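-- pv_equiv track=rewrite | github.com/LavaDrake-sta/Final-project-degree-completion | src/pii_detector_il.py | _validate_israeli_id
-- ===== SOURCE A (Python) =====
-- def _validate_israeli_id(id_num: str) -> bool:
--     """Validate Israeli ID using Luhn algorithm"""
--     if len(id_num) != 9 or not id_num.isdigit():
--         return False
--
--     # Luhn check
--     total = 0
--     for i, digit in enumerate(id_num):
--         num = int(digit)
--         if i % 2 == 0:
--             num *= 1
--         else:
--             num *= 2
--             if num > 9:
--                 num = num // 10 + num % 10
--         total += num
--
--     return total % 10 == 0
-- ===== SOURCE B (Python) =====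
-- _DBL = (0, 2, 4, 6, 8, 1, 3, 5, 7, 9)
--
-- def _validate_israeli_id(id_num: str) -> bool:
--     if len(id_num) != 9 or not id_num.isdigit():
--         return False
--     total = sum(int(d) for d in id_num[0::2]) + sum(_DBL[int(d)] for d in id_num[1::2])
--     return total % 10 == 0
-- ===== Notes on version B (the rewrite author's own statement) =====
-- stated objective: alternative
-- what changed: A's per-character enumerate loop with an in-line double-and-reduce branch is replaced by a precomputed doubling lookup table and two separate sums over the even-index and odd-index slices of the string.
import Mathlib
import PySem

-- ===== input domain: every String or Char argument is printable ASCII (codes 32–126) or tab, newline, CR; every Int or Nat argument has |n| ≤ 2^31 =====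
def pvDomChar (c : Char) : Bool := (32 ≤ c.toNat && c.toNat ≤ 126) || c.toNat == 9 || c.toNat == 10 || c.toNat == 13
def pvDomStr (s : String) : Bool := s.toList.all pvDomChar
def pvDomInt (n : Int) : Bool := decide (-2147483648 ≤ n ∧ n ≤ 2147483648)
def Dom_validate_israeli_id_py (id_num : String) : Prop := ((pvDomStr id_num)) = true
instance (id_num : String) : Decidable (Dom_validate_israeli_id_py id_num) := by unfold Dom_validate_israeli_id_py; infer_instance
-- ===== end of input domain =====

-- B replaces A's per-digit doubling-and-reduction branch by a precomputed lookup table and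
-- sums the even and odd positions in two slice passes (alternative decomposition, same cost).

-- ===== PORT A =====
def validate_israeli_id_py (id_num : String) : Bool :=
  if PySem.Str.len id_num ≠ 9 ∨ ¬ PySem.Str.strIsdigit id_num then false
  else
    let total : Int := (PySem.List.enumerate id_num.toList 0).foldl
      (fun total p =>
        -- int(digit): exact here — the isdigit guard makes p.2 an ASCII digit
        let num : Int := (p.2.toNat : Int) - 48
        let num : Int :=
          if PySem.Int.mod p.1 2 = 0 then num * 1
          else
            let num := num * 2
            if num > 9 then PySem.Int.floordiv num 10 + PySem.Int.mod num 10 else num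
        total + num) 0
    decide (PySem.Int.mod total 10 = 0)

-- ===== PORT B =====
def dblTable : List Int := [0, 2, 4, 6, 8, 1, 3, 5, 7, 9]

def validate_israeli_id_py_alt (id_num : String) : Bool :=
  if PySem.Str.len id_num ≠ 9 ∨ ¬ PySem.Str.strIsdigit id_num then false
  else
    -- int(d): exact here — the isdigit guard makes every d an ASCII digit
    let evens : Int := (((PySem.Str.slice? id_num none none 2).getD "").toList.map
      (fun d => ((d.toNat : Int) - 48))).sum
    let odds : Int := (((PySem.Str.slice? id_num (some 1) none 2).getD "").toList.map
      (fun d => PySem.List.pyGetD dblTable ((d.toNat : Int) - 48) 0)).sum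
    decide (PySem.Int.mod (evens + odds) 10 = 0)

-- ===== PRECONDITION & SPEC =====
def Spec_validate_israeli_id_py (id_num : String) (out : Bool) : Prop := out = validate_israeli_id_py_alt id_num
instance (id_num : String) (out : Bool) : Decidable (Spec_validate_israeli_id_py id_num out) := by unfold Spec_validate_israeli_id_py; infer_instance

-- ===== CLAIM (what is proved, stated in full; the proofs are below) =====
def Claim_equal_validate_israeli_id_py : Prop := ∀ (id_num : String), Dom_validate_israeli_id_py id_num → Spec_validate_israeli_id_py id_num (validate_israeli_id_py id_num)

-- ===== LEMMAS AND PROOFS =====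

-- an ASCII digit's code point is between 48 and 57
theorem isdigit_bounds (c : Char) (h : PySem.Chars.isdigit c = true) :
    48 ≤ c.toNat ∧ c.toNat ≤ 57 := by
  simp only [PySem.Chars.isdigit, Bool.and_eq_true, decide_eq_true_eq, Char.le_def,
    UInt32.le_iff_toNat_le] at h
  simp only [Char.toNat]
  exact h

-- the table entry equals A's double-then-reduce value, for a digit char
theorem dbl_char (c : Char) (h : PySem.Chars.isdigit c = true) :
    (if ((c.toNat : Int) - 48) * 2 > 9
       then PySem.Int.floordiv (((c.toNat : Int) - 48) * 2) 10
            + PySem.Int.mod (((c.toNat : Int) - 48) * 2) 10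
       else ((c.toNat : Int) - 48) * 2)
    = PySem.List.pyGetD dblTable ((c.toNat : Int) - 48) 0 := by
  obtain ⟨h1, h2⟩ := isdigit_bounds c h
  set n := c.toNat with hn
  interval_cases n <;> decide

theorem len9_exists (l : List Char) (h : l.length = 9) :
    ∃ a b c d e f g i j, l = [a, b, c, d, e, f, g, i, j] := by
  match l, h with
  | [a, b, c, d, e, f, g, i, j], _ => exact ⟨a, b, c, d, e, f, g, i, j, rfl⟩

-- ===== VERDICT (by name: the statement is the Claim_ definition above) =====
theorem validate_israeli_id_py_spec : Claim_equal_validate_israeli_id_py := by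
  intro s _
  unfold Spec_validate_israeli_id_py validate_israeli_id_py validate_israeli_id_py_alt
  by_cases hg : PySem.Str.len s ≠ 9 ∨ ¬ PySem.Str.strIsdigit s
  · rw [if_pos hg, if_pos hg]
  · have hlen : PySem.Str.len s = 9 := by
      by_contra h; exact hg (Or.inl h)
    have hdig : PySem.Str.strIsdigit s = true := by
      by_contra h; exact hg (Or.inr h)
    have hlen' : s.toList.length = 9 := by
      simp only [PySem.Str.len] at hlen; omega
    have hall : ∀ c ∈ s.toList, PySem.Chars.isdigit c = true := by
      simp only [PySem.Str.strIsdigit, PySem.Chars.strIsdigit, Bool.and_eq_true,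
        List.all_eq_true] at hdig
      exact fun c hc => hdig.2 c hc
    obtain ⟨a, b, c, d, e, f, g, i, j, hl⟩ := len9_exists s.toList hlen'
    rw [hl] at hall
    have h1 := dbl_char b (hall b (by simp))
    have h3 := dbl_char d (hall d (by simp))
    have h5 := dbl_char f (hall f (by simp))
    have h7 := dbl_char i (hall i (by simp))
    rw [if_neg hg, if_neg hg]
    simp only [PySem.Str.slice?, PySem.Chars.slice?, hl, PySem.List.enumerate,
      PySem.List.slice?, PySem.List.sliceIndices]
    simp only [show ((2:Int) = 0) = False by simp, show ((2:Int) < 0) = False by simp,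
      show ((0:Int) < 2) = True by simp, if_false, if_true]
    norm_num [List.filterMap, List.foldl, PySem.Int.mod, PySem.Int.floordiv] at h1 h3 h5 h7 ⊢
    simp only [show Int.fmod 1 2 = 1 by decide,
      show Int.fmod 3 2 = 1 by decide, show Int.fmod 4 2 = 0 by decide,
      show Int.fmod 5 2 = 1 by decide, show Int.fmod 6 2 = 0 by decide,
      show Int.fmod 7 2 = 1 by decide, show Int.fmod 8 2 = 0 by decide,
      show Int.toNat 5 = 5 by decide, show Int.toNat 4 = 4 by decide,
      if_true, if_false, one_ne_zero, List.range_succ]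
    norm_num [List.filterMap]
    simp only [show Int.toNat 2 = 2 from rfl, show Int.toNat 3 = 3 from rfl,
      show Int.toNat 4 = 4 from rfl, show Int.toNat 5 = 5 from rfl,
      show Int.toNat 6 = 6 from rfl, show Int.toNat 7 = 7 from rfl,
      show Int.toNat 8 = 8 from rfl, List.getElem_cons_zero, List.getElem_cons_succ]
    rw [h1, h3, h5, h7]
    ring_nf
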